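-- pv_equiv track=rewrite | github.com/bevanlee/aoc2023 | d02.py | minimum_possible
-- ===== SOURCE A (Python) =====
-- def minimum_possible(bag, draws):
--     if draws:
--         draw = draws.pop()
--         for colour in draw:
--             if draw[colour] > bag[colour]:
--                 bag[colour] = draw[colour]
--         bag = minimum_possible(bag, draws)
--     return bag
-- ===== SOURCE B (Python) =====
-- # Flat forward iteration over a fresh copy instead of A's recursion that pops
-- # draws off the end and mutates bag in place. Return-value equivalence only:
-- # A drains `draws` and mutates `bag`; B leaves both arguments untouched.
-- def minimum_possible(bag, draws):
--     best = dict(bag)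
--     for draw in draws:
--         for colour, count in draw.items():
--             if count > best[colour]:
--                 best[colour] = count
--     return best
-- ===== Notes on version B (the rewrite author's own statement) =====
-- stated objective: simpler
-- what changed: A recursively pops draws off the END of the list and mutates bag in place; B is a flat forward loop over the draws' items that updates a fresh copy of bag, with no recursion and no argument mutation.
import Mathlib
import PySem

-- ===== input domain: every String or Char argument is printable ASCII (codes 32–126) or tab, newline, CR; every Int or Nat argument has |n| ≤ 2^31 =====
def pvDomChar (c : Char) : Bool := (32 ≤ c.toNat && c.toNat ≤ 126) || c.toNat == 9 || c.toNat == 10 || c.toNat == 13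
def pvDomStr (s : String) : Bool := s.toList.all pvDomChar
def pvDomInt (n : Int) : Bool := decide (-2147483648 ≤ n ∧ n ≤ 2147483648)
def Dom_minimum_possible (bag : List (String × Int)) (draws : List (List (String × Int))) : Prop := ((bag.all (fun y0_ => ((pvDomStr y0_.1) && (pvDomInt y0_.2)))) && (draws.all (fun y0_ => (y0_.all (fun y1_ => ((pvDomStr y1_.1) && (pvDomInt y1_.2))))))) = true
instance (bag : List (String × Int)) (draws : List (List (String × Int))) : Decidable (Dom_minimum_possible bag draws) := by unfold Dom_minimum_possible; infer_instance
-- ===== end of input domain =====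

-- B replaces A's recursion (which pops draws off the END and mutates bag in place) by a flat
-- forward loop over a fresh copy of bag; equivalence is about the RETURN value only (A drains
-- `draws` and mutates `bag` in place, B leaves both arguments untouched).

-- ===== PORT A =====
-- one pass of A's inner `for colour in draw` loop
def pvDrawStep (bag draw : PySem.Dict String Int) : PySem.Dict String Int :=
  (PySem.Dict.keys draw).foldl
    (fun b colour =>
      if PySem.Dict.getD draw colour 0 > PySem.Dict.getD b colour 0 then
        -- Python `bag[colour]` raises KeyError when colour ∉ bag; Pre_ excludes that,
        -- so the total getD-with-0 read is exact on the admitted inputs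
        PySem.Dict.insert b colour (PySem.Dict.getD draw colour 0)
      else b)
    bag

-- A's recursion: pop the LAST draw, fold it into bag, recurse on the rest
def pvA (bag : PySem.Dict String Int) (draws : List (PySem.Dict String Int)) :
    PySem.Dict String Int :=
  if h : draws = [] then bag
  else pvA (pvDrawStep bag (draws.getLast h)) draws.dropLast
termination_by draws.length
decreasing_by
  have : draws.length ≠ 0 := fun hz => h (List.length_eq_zero_iff.mp hz)
  simp [List.length_dropLast]; omega

def minimum_possible (bag : List (String × Int)) (draws : List (List (String × Int))) : List (String × Int) :=
  (pvA (PySem.Dict.mk bag) (draws.map PySem.Dict.mk)).items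

-- ===== PORT B =====
-- best = dict(bag); for draw in draws: for colour, count in draw.items():
--   if count > best[colour]: best[colour] = count;  return best
def minimum_possible_alt (bag : List (String × Int)) (draws : List (List (String × Int))) : List (String × Int) :=
  (draws.foldl
    (fun best draw =>
      draw.foldl
        (fun best kv =>
          -- Python `best[colour]` raises KeyError when colour ∉ best; Pre_ excludes that,
          -- so the total getD-with-0 read is exact on the admitted inputs
          if kv.2 > PySem.Dict.getD best kv.1 0 then PySem.Dict.insert best kv.1 kv.2
          else best)
        best)
    (PySem.Dict.mk bag)).items

-- ===== PRECONDITION & SPEC =====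
-- Pre_ excludes inputs where A (and B) raise KeyError (a draw colour missing from bag) and,
-- per the dict type convention, association lists with duplicate keys (a Python dict cannot
-- have them).
def Pre_minimum_possible (bag : List (String × Int)) (draws : List (List (String × Int))) : Prop :=
  (bag.map Prod.fst).Nodup ∧
  ∀ draw ∈ draws, (draw.map Prod.fst).Nodup ∧ ∀ kv ∈ draw, kv.1 ∈ bag.map Prod.fst
instance (bag : List (String × Int)) (draws : List (List (String × Int))) : Decidable (Pre_minimum_possible bag draws) := by unfold Pre_minimum_possible; infer_instance

def pvWitness_minimum_possible : (List (String × Int)) × (List (List (String × Int))) :=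
  ([("red", 1), ("green", 2)], [[("green", 5)], [("red", 0), ("green", 1)]])

def Spec_minimum_possible (bag : List (String × Int)) (draws : List (List (String × Int))) (out : List (String × Int)) : Prop := out = minimum_possible_alt bag draws
instance (bag : List (String × Int)) (draws : List (List (String × Int))) (out : List (String × Int)) : Decidable (Spec_minimum_possible bag draws out) := by unfold Spec_minimum_possible; infer_instance

-- ===== CLAIM (what is proved, stated in full; the proofs are below) =====
def Claim_equal_minimum_possible : Prop := ∀ (bag : List (String × Int)) (draws : List (List (String × Int))), Dom_minimum_possible bag draws → Pre_minimum_possible bag draws → Spec_minimum_possible bag draws (minimum_possible bag draws)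

-- ===== LEMMAS AND PROOFS =====

-- one conditional insert = pointwise map over the items (needs unique keys, key present)
theorem pvStep_one (b : PySem.Dict String Int) (c : String) (v : Int)
    (hnd : (PySem.Dict.keys b).Nodup) (hc : c ∈ PySem.Dict.keys b) :
    (if v > PySem.Dict.getD b c 0 then PySem.Dict.insert b c v else b) =
      PySem.Dict.mk (b.items.map (fun kv => if kv.1 = c then (kv.1, max kv.2 v) else kv)) := by
  split_ifs with h
  · apply PySem.Dict.ext
    rw [PySem.Dict.items_insert_of_contains _ _ ((PySem.Dict.contains_iff_mem_keys b c).mpr hc)]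
    apply List.map_congr_left
    intro p hp
    by_cases hpc : p.1 = c
    · have hpe : p = (c, p.2) := by cases p; simp_all
      have hval : PySem.Dict.getD b c 0 = p.2 :=
        PySem.Dict.getD_of_mem_items b (hpe ▸ hp) hnd 0
      have hm : max p.2 v = v := by rw [hval] at h; omega
      simp [hpc, hm]
    · simp [hpc]
  · apply PySem.Dict.ext
    show b.items = _
    conv_lhs => rw [← List.map_id b.items]
    apply List.map_congr_left
    intro p hp
    by_cases hpc : p.1 = c
    · have hpe : p = (c, p.2) := by cases p; simp_all
      have hval : PySem.Dict.getD b c 0 = p.2 :=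
        PySem.Dict.getD_of_mem_items b (hpe ▸ hp) hnd 0
      have hm : max p.2 v = p.2 := by rw [hval] at h; omega
      simp [hpc, hm]
      exact hpe
    · simp [hpc]

-- A's inner loop over a fixed draw's key list, as one pointwise map
theorem pvDrawStep_fold (d : PySem.Dict String Int) (ks : List String) :
    ∀ (b : PySem.Dict String Int), (PySem.Dict.keys b).Nodup →
      (∀ c ∈ ks, c ∈ PySem.Dict.keys b) →
      ks.foldl
        (fun b colour =>
          if PySem.Dict.getD d colour 0 > PySem.Dict.getD b colour 0 then
            PySem.Dict.insert b colour (PySem.Dict.getD d colour 0)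
          else b) b =
      PySem.Dict.mk (b.items.map (fun kv =>
        if kv.1 ∈ ks then (kv.1, max kv.2 (PySem.Dict.getD d kv.1 0)) else kv)) := by
  induction ks with
  | nil =>
      intro b _ _
      simp
  | cons c ks ih =>
      intro b hnd hsub
      rw [List.foldl_cons,
          pvStep_one b c (PySem.Dict.getD d c 0) hnd (hsub c (List.mem_cons_self))]
      set f_c : String × Int → String × Int :=
        fun kv => if kv.1 = c then (kv.1, max kv.2 (PySem.Dict.getD d c 0)) else kv with hf
      have hfst : ∀ kv, (f_c kv).1 = kv.1 := by
        intro kv; by_cases h : kv.1 = c <;> simp [hf, h]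
      have hkeys : PySem.Dict.keys (PySem.Dict.mk (b.items.map f_c)) = PySem.Dict.keys b := by
        simp [PySem.Dict.keys, List.map_map]
        intro a w _
        exact hfst (a, w)
      rw [ih _ (by rw [hkeys]; exact hnd)
             (by intro x hx; rw [hkeys]; exact hsub x (List.mem_cons_of_mem _ hx))]
      apply PySem.Dict.ext
      show List.map _ (PySem.Dict.items (PySem.Dict.mk (b.items.map f_c))) = _
      have hitems : PySem.Dict.items (PySem.Dict.mk (b.items.map f_c)) = b.items.map f_c := rfl
      rw [hitems, List.map_map]
      apply List.map_congr_left
      intro kv _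
      by_cases h1 : kv.1 = c <;> by_cases h2 : kv.1 ∈ ks <;>
        simp [hf, h1, h2, Function.comp]

-- A's recursion is the right fold of pvDrawStep over the draws
theorem pvA_eq_foldr (draws : List (PySem.Dict String Int)) (b : PySem.Dict String Int) :
    pvA b draws = draws.foldr (fun d b => pvDrawStep b d) b := by
  induction draws using List.reverseRecOn generalizing b with
  | nil => rw [pvA]; simp
  | append_singleton ds d ih =>
      rw [pvA]
      have hne : ds ++ [d] ≠ [] := by simp
      simp only [hne, dite_false, List.getLast_concat, List.dropLast_concat,
        List.foldr_concat]
      exact ih _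

-- characterisation of A: per-entry fold over the draws
theorem pvA_char (draws : List (PySem.Dict String Int)) :
    ∀ (b : PySem.Dict String Int), (PySem.Dict.keys b).Nodup →
      (∀ d ∈ draws, ∀ k ∈ PySem.Dict.keys d, k ∈ PySem.Dict.keys b) →
      draws.foldr (fun d b => pvDrawStep b d) b =
        PySem.Dict.mk (b.items.map (fun kv =>
          (kv.1, draws.foldr
            (fun d v => match PySem.Dict.get? d kv.1 with | some x => max v x | none => v)
            kv.2))) := by
  induction draws with
  | nil =>
      intro b _ _
      simp
  | cons d ds ih =>
      intro b hnd hsub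
      rw [List.foldr_cons, ih b hnd (fun d' hd' => hsub d' (List.mem_cons_of_mem _ hd'))]
      set g : String × Int → String × Int := fun kv =>
        (kv.1, ds.foldr
          (fun d v => match PySem.Dict.get? d kv.1 with | some x => max v x | none => v)
          kv.2) with hg
      have hkeys : PySem.Dict.keys (PySem.Dict.mk (b.items.map g)) = PySem.Dict.keys b := by
        simp [PySem.Dict.keys, List.map_map]
        intro a w _
        rfl
      rw [pvDrawStep,
          pvDrawStep_fold d (PySem.Dict.keys d) _
            (by rw [hkeys]; exact hnd)
            (by intro x hx; rw [hkeys]; exact hsub d List.mem_cons_self x hx)]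
      apply PySem.Dict.ext
      show List.map _ (b.items.map g) = _
      rw [List.map_map]
      apply List.map_congr_left
      intro kv _
      simp only [Function.comp, hg]
      cases hq : PySem.Dict.get? d kv.1 with
      | none =>
          have : kv.1 ∉ PySem.Dict.keys d :=
            (PySem.Dict.get?_eq_none_iff_not_mem_keys d kv.1).mp hq
          simp [this, hq]
      | some x =>
          have hmem : kv.1 ∈ PySem.Dict.keys d := by
            by_contra hcon
            rw [(PySem.Dict.get?_eq_none_iff_not_mem_keys d kv.1).mpr hcon] at hq
            simp at hq
          have hgd : PySem.Dict.getD d kv.1 0 = x := by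
            rw [PySem.Dict.getD_eq_get?_getD, hq]; rfl
          simp [hmem, hgd, hq]

-- B's inner loop over one draw's pairs, as one pointwise map
theorem pvPairs_fold (ps : List (String × Int)) :
    ∀ (b : PySem.Dict String Int), (PySem.Dict.keys b).Nodup →
      (∀ kv ∈ ps, kv.1 ∈ PySem.Dict.keys b) →
      ps.foldl
        (fun best kv =>
          if kv.2 > PySem.Dict.getD best kv.1 0 then PySem.Dict.insert best kv.1 kv.2
          else best) b =
      PySem.Dict.mk (b.items.map (fun e =>
        (e.1, ps.foldl (fun v q => if q.1 = e.1 then max v q.2 else v) e.2))) := by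
  induction ps with
  | nil =>
      intro b _ _
      simp
  | cons kv ps ih =>
      intro b hnd hsub
      rw [List.foldl_cons,
          pvStep_one b kv.1 kv.2 hnd (hsub kv (List.mem_cons_self))]
      set f_c : String × Int → String × Int :=
        fun e => if e.1 = kv.1 then (e.1, max e.2 kv.2) else e with hf
      have hfst : ∀ e, (f_c e).1 = e.1 := by
        intro e; by_cases h : e.1 = kv.1 <;> simp [hf, h]
      have hkeys : PySem.Dict.keys (PySem.Dict.mk (b.items.map f_c)) = PySem.Dict.keys b := by
        simp [PySem.Dict.keys, List.map_map]
        intro a w _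
        exact hfst (a, w)
      rw [ih _ (by rw [hkeys]; exact hnd)
             (by intro q hq; rw [hkeys]; exact hsub q (List.mem_cons_of_mem _ hq))]
      apply PySem.Dict.ext
      show List.map _ (PySem.Dict.items (PySem.Dict.mk (b.items.map f_c))) = _
      have hitems : PySem.Dict.items (PySem.Dict.mk (b.items.map f_c)) = b.items.map f_c := rfl
      rw [hitems, List.map_map]
      apply List.map_congr_left
      intro e _
      by_cases h1 : e.1 = kv.1
      · simp [hf, h1]
      · have h1' : ¬ kv.1 = e.1 := fun he => h1 he.symm
        simp [hf, h1, h1']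

-- a key absent from the pairs leaves the per-entry fold unchanged
theorem pvPairfold_absent (ps : List (String × Int)) (k : String) (v : Int)
    (h : k ∉ ps.map Prod.fst) :
    ps.foldl (fun v q => if q.1 = k then max v q.2 else v) v = v := by
  induction ps generalizing v with
  | nil => rfl
  | cons q ps ih =>
      have hq : q.1 ≠ k := by intro he; exact h (by simp [← he])
      rw [List.foldl_cons, if_neg hq]
      exact ih v (fun hm => h (List.mem_cons_of_mem _ hm))

-- with unique keys the per-entry fold is a single lookup-and-max
theorem pvPairfold_get? (ps : List (String × Int)) (k : String) (v : Int)
    (hnd : (ps.map Prod.fst).Nodup) :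
    ps.foldl (fun v q => if q.1 = k then max v q.2 else v) v =
      match PySem.Dict.get? (PySem.Dict.mk ps) k with
      | some x => max v x
      | none => v := by
  induction ps generalizing v with
  | nil => rfl
  | cons q ps ih =>
      rw [List.map_cons, List.nodup_cons] at hnd
      rw [List.foldl_cons, PySem.Dict.get?_mk_cons]
      by_cases hq : q.1 = k
      · rw [if_pos hq, hq]
        simp only [beq_self_eq_true, if_pos]
        exact pvPairfold_absent ps k (max v q.2) (hq ▸ hnd.1)
      · rw [if_neg hq]
        have : (q.1 == k) = false := beq_eq_false_iff_ne.mpr hq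
        simp only [this, Bool.false_eq_true, if_neg, not_false_iff]
        exact ih v hnd.2

-- characterisation of B's outer loop: per-entry left fold over the draws
theorem pvB_char (draws : List (List (String × Int))) :
    ∀ (b : PySem.Dict String Int), (PySem.Dict.keys b).Nodup →
      (∀ draw ∈ draws, (draw.map Prod.fst).Nodup ∧ ∀ kv ∈ draw, kv.1 ∈ PySem.Dict.keys b) →
      draws.foldl
        (fun best draw =>
          draw.foldl
            (fun best kv =>
              if kv.2 > PySem.Dict.getD best kv.1 0 then PySem.Dict.insert best kv.1 kv.2
              else best) best) b =
      PySem.Dict.mk (b.items.map (fun e =>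
        (e.1, draws.foldl
          (fun v draw =>
            match PySem.Dict.get? (PySem.Dict.mk draw) e.1 with
            | some x => max v x
            | none => v)
          e.2))) := by
  induction draws with
  | nil =>
      intro b _ _
      simp
  | cons d ds ih =>
      intro b hnd hsub
      rw [List.foldl_cons, pvPairs_fold d b hnd (hsub d List.mem_cons_self).2]
      set f_d : String × Int → String × Int := fun e =>
        (e.1, d.foldl (fun v q => if q.1 = e.1 then max v q.2 else v) e.2) with hf
      have hkeys : PySem.Dict.keys (PySem.Dict.mk (b.items.map f_d)) = PySem.Dict.keys b := by
        simp [PySem.Dict.keys, List.map_map]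
        intro a w _
        rfl
      rw [ih _ (by rw [hkeys]; exact hnd)
             (by intro dr hdr
                 refine ⟨(hsub dr (List.mem_cons_of_mem _ hdr)).1, ?_⟩
                 intro kv hkv; rw [hkeys]
                 exact (hsub dr (List.mem_cons_of_mem _ hdr)).2 kv hkv)]
      apply PySem.Dict.ext
      show List.map _ (b.items.map f_d) = _
      rw [List.map_map]
      apply List.map_congr_left
      intro e _
      simp only [Function.comp, hf, List.foldl_cons]
      rw [pvPairfold_get? d e.1 e.2 (hsub d List.mem_cons_self).1]

-- max-with-lookup steps commute past an extra seeded max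
theorem pvFoldr_max_comm {α : Type} (g : α → Option Int) (ds : List α) (v x : Int) :
    ds.foldr (fun d w => match g d with | some y => max w y | none => w) (max v x)
      = max (ds.foldr (fun d w => match g d with | some y => max w y | none => w) v) x := by
  induction ds with
  | nil => rfl
  | cons d ds ih =>
      simp only [List.foldr_cons, ih]
      cases g d with
      | none => rfl
      | some y => simp [max_right_comm]

-- the per-entry fold may run in either direction (max is commutative)
theorem pvFoldl_eq_foldr {α : Type} (g : α → Option Int) (ds : List α) (v : Int) :
    ds.foldl (fun w d => match g d with | some y => max w y | none => w) v
      = ds.foldr (fun d w => match g d with | some y => max w y | none => w) v := by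
  induction ds generalizing v with
  | nil => rfl
  | cons d ds ih =>
      rw [List.foldl_cons, List.foldr_cons, ih]
      cases g d with
      | none => rfl
      | some x => exact pvFoldr_max_comm g ds v x

-- ===== VERDICT (by name: the statement is the Claim_ definition above) =====
theorem minimum_possible_spec : Claim_equal_minimum_possible := by
  intro bag draws _ hpre
  obtain ⟨hbag, hdraws⟩ := hpre
  show minimum_possible bag draws = minimum_possible_alt bag draws
  rw [minimum_possible, pvA_eq_foldr,
      pvA_char (draws.map PySem.Dict.mk) (PySem.Dict.mk bag)
        (by simpa [PySem.Dict.keys] using hbag)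
        (by
          intro d hd k hk
          obtain ⟨d0, hd0, rfl⟩ := List.mem_map.mp hd
          simp only [PySem.Dict.keys] at hk ⊢
          obtain ⟨kv, hkv, rfl⟩ := List.mem_map.mp hk
          exact (hdraws d0 hd0).2 kv hkv)]
  rw [minimum_possible_alt,
      pvB_char draws (PySem.Dict.mk bag)
        (by simpa [PySem.Dict.keys] using hbag)
        (by
          intro dr hdr
          refine ⟨(hdraws dr hdr).1, ?_⟩
          intro kv hkv
          simp only [PySem.Dict.keys]
          exact (hdraws dr hdr).2 kv hkv)]
  show List.map _ (PySem.Dict.items (PySem.Dict.mk bag)) = _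
  have hb : PySem.Dict.items (PySem.Dict.mk bag) = bag := rfl
  rw [hb]
  apply List.map_congr_left
  intro kv _
  rw [List.foldr_map,
      pvFoldl_eq_foldr (fun draw => PySem.Dict.get? (PySem.Dict.mk draw) kv.1) draws kv.2]
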